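-- pv_equiv track=rewrite | github.com/albertocabasvidani/migrazione-partechipazione | CSV_Export/unifica_csv.py | ottieni_email_prioritarie
-- ===== SOURCE A (Python) =====
-- def ottieni_email_prioritarie(emails_dict, max_emails=3):
--     """Seleziona fino a 3 email con priorità: generica, biblioteca, specifica, altro"""
--     result = []
--
--     priorita = ['generica', 'biblioteca', 'specifica', 'altro']
--
--     for tipo in priorita:
--         if tipo in emails_dict and emails_dict[tipo]:
--             for email in emails_dict[tipo]:
--                 if email and email not in result:
--                     result.append(email)
--                     if len(result) >= max_emails:
--                         return result
--
--     return result
-- ===== SOURCE B (Python) =====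
-- def ottieni_email_prioritarie(emails_dict, max_emails=3):
--     """Seleziona fino a 3 email con priorità: generica, biblioteca, specifica, altro"""
--     seen = set()
--     candidates = []
--     for tipo in ['generica', 'biblioteca', 'specifica', 'altro']:
--         for email in emails_dict.get(tipo, []):
--             if email and email not in seen:
--                 seen.add(email)
--                 candidates.append(email)
--     result = []
--     for email in candidates:
--         if len(result) >= max_emails:
--             break
--         result.append(email)
--     return result
-- ===== Notes on version B (the rewrite author's own statement) =====
-- stated objective: alternative
-- what changed: B replaces A's fused per-category loop (dedup by scanning the growing result list, early return from inside the nested loop) with a two-phase decomposition: first build the full ordered deduplicated candidate list with a seen-set, then a separate flat loop that stops once the cap is reached.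
-- intended difference: When max_emails <= 0 and some priority category holds a non-empty email, A still returns a one-element list (it appends before checking the cap) while B returns [], which is the intended value for a cap of at most zero emails. — e.g. on ottieni_email_prioritarie([("generica", ["a@b"])], 0): A returns ["a@b"], B returns []
import Mathlib
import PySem

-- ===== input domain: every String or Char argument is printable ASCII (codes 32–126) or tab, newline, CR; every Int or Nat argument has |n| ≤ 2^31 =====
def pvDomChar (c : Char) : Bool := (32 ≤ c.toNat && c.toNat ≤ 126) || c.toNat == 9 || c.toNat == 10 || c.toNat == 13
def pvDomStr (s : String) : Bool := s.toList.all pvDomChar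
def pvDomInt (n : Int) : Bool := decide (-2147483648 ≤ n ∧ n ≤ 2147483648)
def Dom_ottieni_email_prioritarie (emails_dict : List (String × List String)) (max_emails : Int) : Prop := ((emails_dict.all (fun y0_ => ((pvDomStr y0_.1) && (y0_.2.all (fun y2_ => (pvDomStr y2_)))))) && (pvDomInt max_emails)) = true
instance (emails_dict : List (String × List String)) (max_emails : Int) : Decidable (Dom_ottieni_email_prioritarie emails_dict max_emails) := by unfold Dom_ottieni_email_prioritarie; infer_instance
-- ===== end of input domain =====

-- B replaces A's fused per-category scan (dedup against the growing result, early return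
-- inside the nested loop) by a two-phase decomposition: build the whole deduplicated
-- candidate list first (seen-set), then a separate flat loop stopping at the cap.
-- On max_emails ≤ 0 with a candidate present A returns one email while B returns [] (see D_).

-- ===== PORT A =====
-- inner 'for email in emails_dict[tipo]' loop; Bool = early 'return result' taken
def pvA_inner (max_emails : Int) (result : List String) (emails : List String) : List String × Bool :=
  match emails with
  | [] => (result, false)
  | e :: rest =>
    if e != "" && !result.contains e then
      let result' := result ++ [e]
      if max_emails ≤ (result'.length : Int) then (result', true)
      else pvA_inner max_emails result' rest
    else pvA_inner max_emails result rest

-- outer 'for tipo in priorita' loop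
def pvA_outer (d : PySem.Dict String (List String)) (max_emails : Int) (result : List String) (priorita : List String) : List String :=
  match priorita with
  | [] => result
  | tipo :: rest =>
    match d.get? tipo with   -- 'tipo in emails_dict' + 'emails_dict[tipo]'
    | some lst =>
      if lst ≠ [] then       -- truthiness of the list
        match pvA_inner max_emails result lst with
        | (r, true) => r
        | (r, false) => pvA_outer d max_emails r rest
      else pvA_outer d max_emails result rest
    | none => pvA_outer d max_emails result rest

def ottieni_email_prioritarie (emails_dict : List (String × List String)) (max_emails : Int) : List String :=
  pvA_outer (PySem.Dict.mk emails_dict) max_emails [] ["generica", "biblioteca", "specifica", "altro"]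

-- ===== PORT B =====
-- phase 1: 'for email in emails_dict.get(tipo, []): if email and email not in seen: …'
def pvB_build1 (sc : PySem.Set String × List String) (emails : List String) : PySem.Set String × List String :=
  emails.foldl (fun sc e =>
    if e != "" && !(PySem.Set.contains sc.1 e) then (PySem.Set.add sc.1 e, sc.2 ++ [e]) else sc) sc

-- phase 2: 'for email in candidates: if len(result) >= max_emails: break; result.append(email)'
def pvB_select (max_emails : Int) (result : List String) (cands : List String) : List String :=
  match cands with
  | [] => result
  | e :: rest =>
    if max_emails ≤ (result.length : Int) then result
    else pvB_select max_emails (result ++ [e]) rest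

def ottieni_email_prioritarie_alt (emails_dict : List (String × List String)) (max_emails : Int) : List String :=
  let d := PySem.Dict.mk emails_dict
  let sc := ["generica", "biblioteca", "specifica", "altro"].foldl
    (fun sc tipo => pvB_build1 sc (d.getD tipo [])) (PySem.Set.empty, [])
  pvB_select max_emails [] sc.2

-- ===== PRECONDITION & SPEC =====
-- When max_emails ≤ 0 and some priority category holds a non-empty email, A still returns a
-- one-element list (it appends before checking the cap) while B returns [], which is the
-- intended value for a cap of at most zero emails.
def D_ottieni_email_prioritarie (emails_dict : List (String × List String)) (max_emails : Int) : Prop :=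
  max_emails ≤ 0 ∧
  (["generica", "biblioteca", "specifica", "altro"].any
    (fun t => ((PySem.Dict.mk emails_dict).getD t []).any (fun e => e != ""))) = true
instance (emails_dict : List (String × List String)) (max_emails : Int) : Decidable (D_ottieni_email_prioritarie emails_dict max_emails) := by unfold D_ottieni_email_prioritarie; infer_instance

def Spec_ottieni_email_prioritarie (emails_dict : List (String × List String)) (max_emails : Int) (out : List String) : Prop := ¬ D_ottieni_email_prioritarie emails_dict max_emails → out = ottieni_email_prioritarie_alt emails_dict max_emails
instance (emails_dict : List (String × List String)) (max_emails : Int) (out : List String) : Decidable (Spec_ottieni_email_prioritarie emails_dict max_emails out) := by unfold Spec_ottieni_email_prioritarie; infer_instance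

def pvDiffWitness_ottieni_email_prioritarie : (List (String × List String)) × Int := ([("generica", ["a@b"])], 0)
def pvDiffWitnessOut_ottieni_email_prioritarie : (List String) × (List String) := (["a@b"], [])

-- ===== CLAIM (what is proved, stated in full; the proofs are below) =====
def Claim_unchanged_ottieni_email_prioritarie : Prop := ∀ (emails_dict : List (String × List String)) (max_emails : Int), Dom_ottieni_email_prioritarie emails_dict max_emails → Spec_ottieni_email_prioritarie emails_dict max_emails (ottieni_email_prioritarie emails_dict max_emails)
def Claim_changed_ottieni_email_prioritarie : Prop := Dom_ottieni_email_prioritarie (pvDiffWitness_ottieni_email_prioritarie.1) (pvDiffWitness_ottieni_email_prioritarie.2) ∧ D_ottieni_email_prioritarie (pvDiffWitness_ottieni_email_prioritarie.1) (pvDiffWitness_ottieni_email_prioritarie.2) ∧ ottieni_email_prioritarie (pvDiffWitness_ottieni_email_prioritarie.1) (pvDiffWitness_ottieni_email_prioritarie.2) = pvDiffWitnessOut_ottieni_email_prioritarie.1 ∧ ottieni_email_prioritarie_alt (pvDiffWitness_ottieni_email_prioritarie.1) (pvDiffWitness_ottieni_email_prioritarie.2) = pvDiffWitnessOut_ottieni_email_prioritarie.2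 ∧ pvDiffWitnessOut_ottieni_email_prioritarie.1 ≠ pvDiffWitnessOut_ottieni_email_prioritarie.2
def Claim_exact_ottieni_email_prioritarie : Prop := ∀ (emails_dict : List (String × List String)) (max_emails : Int), Dom_ottieni_email_prioritarie emails_dict max_emails → D_ottieni_email_prioritarie emails_dict max_emails → ottieni_email_prioritarie emails_dict max_emails ≠ ottieni_email_prioritarie_alt emails_dict max_emails

-- ===== LEMMAS AND PROOFS =====

-- the fresh truthy emails of `emails`, deduplicated against the growing base `res`
def pvFnew (res : List String) (emails : List String) : List String :=
  match emails with
  | [] => []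
  | e :: rest =>
    if e != "" && !res.contains e then e :: pvFnew (res ++ [e]) rest
    else pvFnew res rest

-- capped selection returning the early-return flag (A's fused shape)
def pvSelP (max_emails : Int) (result : List String) (cands : List String) : List String × Bool :=
  match cands with
  | [] => (result, false)
  | e :: rest =>
    let r := result ++ [e]
    if max_emails ≤ (r.length : Int) then (r, true) else pvSelP max_emails r rest

-- the candidate lists contributed by a sequence of email lists, chained dedup
def pvFnewC (res : List String) (LS : List (List String)) : List String :=
  match LS with
  | [] => []
  | L :: rest =>
    let c := pvFnew res L
    c ++ pvFnewC (res ++ c) rest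

theorem pvA_inner_eq (m : Int) (emails res : List String) :
    pvA_inner m res emails = pvSelP m res (pvFnew res emails) := by
  induction emails generalizing res with
  | nil => rfl
  | cons e rest ih =>
    simp only [pvA_inner, pvFnew]
    split
    · simp only [pvSelP]
      split
      · rfl
      · exact ih (res ++ [e])
    · exact ih res

theorem pvSelP_append (m : Int) (res xs ys : List String) :
    pvSelP m res (xs ++ ys) =
      (match pvSelP m res xs with
       | (r, true) => (r, true)
       | (r, false) => pvSelP m r ys) := by
  induction xs generalizing res with
  | nil => simp [pvSelP]
  | cons e rest ih =>
    simp only [pvSelP, List.cons_append]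
    split
    · rfl
    · exact ih (res ++ [e])

theorem pvSelP_false (m : Int) (res xs : List String)
    (h : (pvSelP m res xs).2 = false) : (pvSelP m res xs).1 = res ++ xs := by
  induction xs generalizing res with
  | nil => simp [pvSelP]
  | cons e rest ih =>
    simp only [pvSelP] at h ⊢
    split at h
    · simp at h
    · rename_i hlt
      simp only [hlt, if_false] at *
      rw [ih (res ++ [e]) h]
      simp

theorem pvA_outer_eq (d : PySem.Dict String (List String)) (m : Int) (pri res : List String) :
    pvA_outer d m res pri =
      (pvSelP m res (pvFnewC res (pri.map (fun t => d.getD t [])))).1 := by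
  induction pri generalizing res with
  | nil => rfl
  | cons tipo rest ih =>
    simp only [pvA_outer, List.map_cons, pvFnewC]
    cases hg : d.get? tipo with
    | none =>
      have hgD : d.getD tipo [] = [] := by rw [PySem.Dict.getD_eq_get?_getD, hg]; rfl
      rw [hgD]
      dsimp only
      simpa [pvFnew] using ih res
    | some lst =>
      have hgD : d.getD tipo [] = lst := by rw [PySem.Dict.getD_eq_get?_getD, hg]; rfl
      rw [hgD]
      dsimp only
      by_cases hne : lst ≠ []
      · rw [if_pos hne, pvA_inner_eq, pvSelP_append]
        cases hs : pvSelP m res (pvFnew res lst) with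
        | mk r flag =>
          cases flag with
          | true => simp
          | false =>
            have hr : r = res ++ pvFnew res lst := by
              have := pvSelP_false m res (pvFnew res lst) (by rw [hs])
              rw [hs] at this; exact this
            simp only []
            rw [ih r, hr]
      · rw [if_neg hne]
        have : lst = [] := not_not.mp hne
        subst this
        simpa [pvFnew] using ih res

theorem pvB_build1_cons (seen : PySem.Set String) (cands : List String) (e : String) (rest : List String) :
    pvB_build1 (seen, cands) (e :: rest) =
      if e != "" && !(PySem.Set.contains seen e) then
        pvB_build1 (PySem.Set.add seen e, cands ++ [e]) rest
      else pvB_build1 (seen, cands) rest := by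
  simp only [pvB_build1, List.foldl_cons]
  split <;> rfl

theorem pvB_build1_spec (emails : List String) (seen : PySem.Set String) (cands : List String)
    (h : ∀ x, x ∈ seen ↔ x ∈ cands) :
    (pvB_build1 (seen, cands) emails).2 = cands ++ pvFnew cands emails ∧
    (∀ x, x ∈ (pvB_build1 (seen, cands) emails).1 ↔ x ∈ (pvB_build1 (seen, cands) emails).2) := by
  induction emails generalizing seen cands with
  | nil =>
    constructor
    · simp [pvB_build1, pvFnew]
    · simpa [pvB_build1] using h
  | cons e rest ih =>
    rw [pvB_build1_cons]
    have hce : PySem.Set.contains seen e = cands.contains e := by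
      simp [PySem.Set.contains_eq_listContains, h e]
    by_cases hc : (e != "" && !(PySem.Set.contains seen e)) = true
    · have hc' : (e != "" && !cands.contains e) = true := by rw [← hce]; exact hc
      rw [if_pos hc]
      have hinv : ∀ x, x ∈ PySem.Set.add seen e ↔ x ∈ cands ++ [e] := by
        intro x
        rw [PySem.Set.mem_add]
        simp [h x, or_comm]
      obtain ⟨h1, h2⟩ := ih (PySem.Set.add seen e) (cands ++ [e]) hinv
      refine ⟨?_, h2⟩
      rw [h1]
      simp only [pvFnew, hc', if_pos]
      simp
    · have hc' : (e != "" && !cands.contains e) = false := by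
        rw [← hce]; simpa using hc
      rw [if_neg hc]
      obtain ⟨h1, h2⟩ := ih seen cands h
      refine ⟨?_, h2⟩
      rw [h1]
      simp only [pvFnew, hc']
      simp

theorem pvB_fold_spec (d : PySem.Dict String (List String)) (ts : List String)
    (seen : PySem.Set String) (cands : List String)
    (h : ∀ x, x ∈ seen ↔ x ∈ cands) :
    (ts.foldl (fun sc tipo => pvB_build1 sc (d.getD tipo [])) (seen, cands)).2
      = cands ++ pvFnewC cands (ts.map (fun t => d.getD t [])) := by
  induction ts generalizing seen cands with
  | nil => simp [pvFnewC]
  | cons t rest ih =>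
    simp only [List.foldl_cons, List.map_cons, pvFnewC]
    obtain ⟨h1, h2⟩ := pvB_build1_spec (d.getD t []) seen cands h
    cases hsc : pvB_build1 (seen, cands) (d.getD t []) with
    | mk s' c' =>
      rw [hsc] at h1 h2
      simp only at h1 h2
      rw [ih s' c' h2, h1]
      simp

-- B's check-then-append loop agrees with A's append-then-check loop while the cap is not yet reached
theorem pvB_select_stop (m : Int) (res cands : List String) (h : m ≤ (res.length : Int)) :
    pvB_select m res cands = res := by
  cases cands with
  | nil => rfl
  | cons e rest => simp [pvB_select, h]

theorem pvB_select_eq_selP (m : Int) (res cands : List String) (h : (res.length : Int) < m) :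
    pvB_select m res cands = (pvSelP m res cands).1 := by
  induction cands generalizing res with
  | nil => rfl
  | cons e rest ih =>
    simp only [pvB_select, pvSelP]
    rw [if_neg (by omega)]
    by_cases hm : m ≤ ((res ++ [e]).length : Int)
    · rw [if_pos hm, pvB_select_stop m (res ++ [e]) rest hm]
    · rw [if_neg hm]
      exact ih (res ++ [e]) (by omega)

theorem pvFnew_nil (res L : List String) (h : pvFnew res L = []) :
    ∀ e ∈ L, e = "" ∨ e ∈ res := by
  induction L generalizing res with
  | nil => simp
  | cons e rest ih =>
    simp only [pvFnew] at h
    split at h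
    · simp at h
    · rename_i hc
      intro x hx
      rcases List.mem_cons.mp hx with rfl | hx
      · 
        exact or_iff_not_imp_left.mpr (by simpa [not_or, List.contains_eq_mem] using hc)
      · exact ih res h x hx

theorem pvFnewC_nil (LS : List (List String)) (h : pvFnewC [] LS = []) :
    ∀ L ∈ LS, ∀ e ∈ L, e = "" := by
  induction LS with
  | nil => simp
  | cons L rest ih =>
    simp only [pvFnewC] at h
    have hc : pvFnew [] L = [] := by
      cases hcc : pvFnew [] L with
      | nil => rfl
      | cons a b => rw [hcc] at h; simp at h
    rw [hc] at h
    simp only [List.nil_append] at h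
    intro M hM e he
    rcases List.mem_cons.mp hM with rfl | hM
    · 
      rcases pvFnew_nil [] M hc e he with h1 | h1
      · exact h1
      · simp at h1
    · exact ih h M hM e he

-- A's and B's common candidate list for a given input
def pvCands (emails_dict : List (String × List String)) : List String :=
  pvFnewC [] (["generica", "biblioteca", "specifica", "altro"].map
    (fun t => (PySem.Dict.mk emails_dict).getD t []))

theorem pvAlt_eq (emails_dict : List (String × List String)) (m : Int) :
    ottieni_email_prioritarie_alt emails_dict m = pvB_select m [] (pvCands emails_dict) := by
  unfold ottieni_email_prioritarie_alt pvCands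
  dsimp only
  rw [pvB_fold_spec _ _ PySem.Set.empty [] (by intro x; simp [PySem.Set.empty])]
  rfl

theorem pvA_eq (emails_dict : List (String × List String)) (m : Int) :
    ottieni_email_prioritarie emails_dict m = (pvSelP m [] (pvCands emails_dict)).1 := by
  unfold ottieni_email_prioritarie pvCands
  rw [pvA_outer_eq]

theorem pvD_cands_ne (emails_dict : List (String × List String))
    (h : (["generica", "biblioteca", "specifica", "altro"].any
      (fun t => ((PySem.Dict.mk emails_dict).getD t []).any (fun e => e != ""))) = true) :
    pvCands emails_dict ≠ [] := by
  intro hnil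
  unfold pvCands at hnil
  have hall := pvFnewC_nil _ hnil
  simp only [List.any_eq_true, bne_iff_ne, ne_eq] at h
  obtain ⟨t, ht, e, he, hne⟩ := h
  exact hne (hall _ (List.mem_map_of_mem ht) e he)

theorem pvD_not_cands (emails_dict : List (String × List String))
    (h : ¬ (["generica", "biblioteca", "specifica", "altro"].any
      (fun t => ((PySem.Dict.mk emails_dict).getD t []).any (fun e => e != ""))) = true) :
    pvCands emails_dict = [] := by
  cases hc : pvCands emails_dict with
  | nil => rfl
  | cons a rest =>
    exfalso
    apply h
    unfold pvCands at hc
    -- a is a member of pvFnewC [], hence a truthy member of some list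
    have hmem : ∀ (res : List String) (LS : List (List String)) (x : String),
        x ∈ pvFnewC res LS → ∃ L ∈ LS, x ∈ L ∧ x ≠ "" := by
      intro res LS
      induction LS generalizing res with
      | nil => simp [pvFnewC]
      | cons L rest ih =>
        intro x hx
        simp only [pvFnewC, List.mem_append] at hx
        rcases hx with hx | hx
        · -- x ∈ pvFnew res L
          have hfl : ∀ (r : List String), x ∈ pvFnew r L → x ∈ L ∧ x ≠ "" := by
            clear hx; induction L with
            | nil => simp [pvFnew]
            | cons e er ihe =>
              intro r hx
              simp only [pvFnew] at hx
              split at hx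
              · rename_i hc2
                rcases List.mem_cons.mp hx with hx | hx
                · subst hx
                  refine ⟨List.mem_cons_self, ?_⟩
                  simpa [bne_iff_ne] using (Bool.and_elim_left hc2)
                · obtain ⟨h1, h2⟩ := ihe (r ++ [e]) hx
                  exact ⟨List.mem_cons_of_mem _ h1, h2⟩
              · obtain ⟨h1, h2⟩ := ihe r hx
                exact ⟨List.mem_cons_of_mem _ h1, h2⟩
          obtain ⟨h1, h2⟩ := hfl res hx
          exact ⟨L, List.mem_cons_self, h1, h2⟩
        · obtain ⟨M, hM, h1, h2⟩ := ih _ _ hx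
          exact ⟨M, List.mem_cons_of_mem _ hM, h1, h2⟩
    obtain ⟨L, hL, h1, h2⟩ := hmem [] _ a (by rw [hc]; exact List.mem_cons_self)
    obtain ⟨t, ht, rfl⟩ := List.mem_map.mp hL
    simp only [List.any_eq_true, bne_iff_ne, ne_eq]
    exact ⟨t, ht, a, h1, h2⟩

-- ===== VERDICT (by name: the statements are the Claim_ definitions above) =====
theorem ottieni_email_prioritarie_spec : Claim_unchanged_ottieni_email_prioritarie := by
  intro emails_dict m _ hnD
  rw [pvA_eq, pvAlt_eq]
  by_cases hb : (["generica", "biblioteca", "specifica", "altro"].any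
      (fun t => ((PySem.Dict.mk emails_dict).getD t []).any (fun e => e != ""))) = true
  · -- candidates may be nonempty; then ¬D forces 0 < m
    have hm : 0 < m := by
      by_contra hm
      exact hnD ⟨by omega, hb⟩
    rw [pvB_select_eq_selP m [] _ (by simpa using hm)]
  · rw [pvD_not_cands emails_dict hb]
    rfl

theorem ottieni_email_prioritarie_changed : Claim_changed_ottieni_email_prioritarie := by
  unfold Claim_changed_ottieni_email_prioritarie; decide

theorem ottieni_email_prioritarie_tight : Claim_exact_ottieni_email_prioritarie := by
  intro emails_dict m _ hD
  obtain ⟨hm, hb⟩ := hD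
  rw [pvA_eq, pvAlt_eq]
  have hne := pvD_cands_ne emails_dict hb
  cases hc : pvCands emails_dict with
  | nil => exact absurd hc hne
  | cons a rest =>
    simp only [pvSelP, pvB_select]
    rw [if_pos (by simp; omega), if_pos (by simp; omega)]
    simp
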